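-- pv_equiv track=rewrite | github.com/joyshmitz/markdown_web_browser | app/dedup.py | _find_exact_boundary_match
-- ===== SOURCE A (Python) =====
-- def _find_exact_boundary_match(prev_tail: list[str], curr_head: list[str]) -> int:
--     """
--     Find exact matching lines at tile boundary (fast path).
--
--     Finds the longest sequence where:
--     - End of prev_tail matches start of curr_head
--
--     For example:
--     - prev_tail = ["A", "B", "C", "D"]
--     - curr_head = ["C", "D", "E", "F"]
--     - Returns 2 (C and D match)
--
--     Args:
--         prev_tail: Last N lines of previous tile
--         curr_head: First N lines of current tile
--
--     Returns:
--         Number of exactly matching lines at boundary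
--     """
--     max_match = 0
--     max_compare = min(len(prev_tail), len(curr_head))
--
--     # Try different overlap sizes, from largest to smallest
--     for overlap_size in range(max_compare, 0, -1):
--         # Check if last overlap_size lines of prev match first overlap_size lines of curr
--         prev_segment = [line.rstrip() for line in prev_tail[-overlap_size:]]
--         curr_segment = [line.rstrip() for line in curr_head[:overlap_size]]
--
--         if prev_segment == curr_segment:
--             max_match = overlap_size
--             break  # Found longest match
--
--     return max_match
-- ===== SOURCE B (Python) =====
-- def _find_exact_boundary_match(prev_tail: list[str], curr_head: list[str]) -> int:
--     # Online multi-candidate prefix matching: scan the tail once, left to right,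
--     # maintaining the set of head-prefix lengths that still match a suffix of
--     # the lines seen so far; the largest surviving candidate is the overlap.
--     head = [line.rstrip() for line in curr_head]
--     live = []  # strictly decreasing list of live match lengths
--     for line in prev_tail:
--         x = line.rstrip()
--         live = [c + 1 for c in live + [0] if c < len(head) and head[c] == x]
--     return live[0] if live else 0
-- ===== Notes on version B (the rewrite author's own statement) =====
-- stated objective: faster
-- what changed: B replaces A's largest-to-smallest enumeration of overlap sizes with full slice comparisons by a single forward scan of prev_tail that maintains the set of live head-prefix match lengths (online multi-candidate matching) and returns the largest survivor, stripping each line once.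
import Mathlib
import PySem

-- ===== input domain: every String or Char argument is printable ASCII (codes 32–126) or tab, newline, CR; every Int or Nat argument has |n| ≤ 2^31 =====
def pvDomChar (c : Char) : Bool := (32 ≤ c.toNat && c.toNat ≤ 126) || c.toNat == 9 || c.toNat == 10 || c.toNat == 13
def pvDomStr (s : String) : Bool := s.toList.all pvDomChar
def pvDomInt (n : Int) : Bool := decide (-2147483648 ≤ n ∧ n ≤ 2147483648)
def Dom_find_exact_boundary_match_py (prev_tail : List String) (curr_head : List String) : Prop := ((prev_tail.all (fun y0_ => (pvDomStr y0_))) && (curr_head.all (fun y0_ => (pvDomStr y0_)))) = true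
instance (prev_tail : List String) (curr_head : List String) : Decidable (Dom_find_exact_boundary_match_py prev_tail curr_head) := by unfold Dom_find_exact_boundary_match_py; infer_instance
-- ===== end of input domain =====

-- B replaces A's largest-to-smallest overlap-size enumeration (slice comparisons) by a single
-- forward scan of prev_tail maintaining the live head-prefix match lengths (alternative algorithm).


-- ===== PORT A =====
-- the 'for overlap_size in range(max_compare, 0, -1): … break' loop, as recursion over the range list
def pvALoop (prev_tail : List String) (curr_head : List String) : List Int → Int
  | [] => 0
  | overlap_size :: rest =>
      let prev_segment := (PySem.List.slice prev_tail (some (-overlap_size)) none).map PySem.Str.rstrip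
      let curr_segment := (PySem.List.slice curr_head none (some overlap_size)).map PySem.Str.rstrip
      if prev_segment = curr_segment then overlap_size
      else pvALoop prev_tail curr_head rest

def find_exact_boundary_match_py (prev_tail : List String) (curr_head : List String) : Int :=
  let max_compare : Int := min (prev_tail.length : Int) (curr_head.length : Int)
  pvALoop prev_tail curr_head (PySem.List.pyRange max_compare 0 (-1))

-- ===== PORT B =====
-- one iteration of Source B's comprehension: 'live = [c + 1 for c in live + [0] if c < len(head) and head[c] == x]'
def pvStep (head : List String) (live : List Int) (x : String) : List Int :=
  ((live ++ [0]).filter (fun c => decide (c < (head.length : Int)) && (PySem.List.pyGetD head c "" == x))).map (fun c => c + 1)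

def find_exact_boundary_match_py_alt (prev_tail : List String) (curr_head : List String) : Int :=
  let head := curr_head.map PySem.Str.rstrip
  let live := prev_tail.foldl (fun live line => pvStep head live (PySem.Str.rstrip line)) []
  match live with
  | [] => 0
  | c :: _ => c

-- ===== PRECONDITION & SPEC =====
def Spec_find_exact_boundary_match_py (prev_tail : List String) (curr_head : List String) (out : Int) : Prop := out = find_exact_boundary_match_py_alt prev_tail curr_head
instance (prev_tail : List String) (curr_head : List String) (out : Int) : Decidable (Spec_find_exact_boundary_match_py prev_tail curr_head out) := by unfold Spec_find_exact_boundary_match_py; infer_instance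

-- ===== CLAIM (what is proved, stated in full; the proofs are below) =====
def Claim_equal_find_exact_boundary_match_py : Prop := ∀ (prev_tail : List String) (curr_head : List String), Dom_find_exact_boundary_match_py prev_tail curr_head → Spec_find_exact_boundary_match_py prev_tail curr_head (find_exact_boundary_match_py prev_tail curr_head)

-- ===== LEMMAS AND PROOFS =====

-- [k, k-1, …, 1]: the candidate overlap sizes, largest first
def descRange : Nat → List Nat
  | 0 => []
  | k+1 => (k+1) :: descRange k

-- 'the last c stripped tail lines equal the first c stripped head lines', as a Bool
def pvQ (T H : List String) (c : Nat) : Bool := T.drop (T.length - c) == H.take c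

theorem mem_descRange {c k : Nat} (h : c ∈ descRange k) : 1 ≤ c ∧ c ≤ k := by
  induction k with
  | zero => simp [descRange] at h
  | succ k ih =>
      rcases (by simpa [descRange] using h : c = k + 1 ∨ c ∈ descRange k) with h | h
      · omega
      · have := ih h; omega

theorem map_succ_descRange (k : Nat) :
    (descRange k ++ [0]).map (fun c => c + 1) = descRange (k + 1) := by
  induction k with
  | zero => simp [descRange]
  | succ k ih => simp only [descRange, List.cons_append, List.map_cons, ih]

theorem pvQ_zero (T H : List String) : pvQ T H 0 = true := by
  simp [pvQ]

-- A's loop from k downwards returns the first (largest) matching size = head of the filtered list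
theorem pvALoop_eq (prev_tail curr_head : List String) : ∀ k : Nat,
    pvALoop prev_tail curr_head (PySem.List.pyRange (k : Int) 0 (-1))
      = ((((descRange k).filter
            (pvQ (prev_tail.map PySem.Str.rstrip) (curr_head.map PySem.Str.rstrip))).headD 0 : Nat) : Int) := by
  intro k
  induction k with
  | zero =>
      rw [PySem.List.pyRange_neg_one_eq_nil (by omega)]
      simp [pvALoop, descRange]
  | succ k ih =>
      have hcons : PySem.List.pyRange ((k + 1 : Nat) : Int) 0 (-1)
          = ((k + 1 : Nat) : Int) :: PySem.List.pyRange (k : Int) 0 (-1) := by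
        rw [PySem.List.pyRange_neg_one_cons (by exact_mod_cast Nat.succ_pos k)]
        norm_num
      rw [hcons]
      simp only [pvALoop]
      have hslice1 : (PySem.List.slice prev_tail (some (-((k + 1 : Nat) : Int))) none).map PySem.Str.rstrip
          = (prev_tail.map PySem.Str.rstrip).drop ((prev_tail.map PySem.Str.rstrip).length - (k + 1)) := by
        rw [PySem.List.slice_from_neg_natCast prev_tail (k + 1) (Nat.succ_pos k), List.map_drop]
        simp
      have hslice2 : (PySem.List.slice curr_head none (some ((k + 1 : Nat) : Int))).map PySem.Str.rstrip
          = (curr_head.map PySem.Str.rstrip).take (k + 1) := by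
        rw [PySem.List.slice_to_natCast, List.map_take]
      rw [hslice1, hslice2]
      by_cases hq : pvQ (prev_tail.map PySem.Str.rstrip) (curr_head.map PySem.Str.rstrip) (k + 1) = true
      · have hq' : (prev_tail.map PySem.Str.rstrip).drop ((prev_tail.map PySem.Str.rstrip).length - (k + 1))
            = (curr_head.map PySem.Str.rstrip).take (k + 1) := by
          have := hq; unfold pvQ at this; exact beq_iff_eq.mp this
        rw [if_pos hq']
        simp only [descRange, List.filter_cons, hq]
        simp
      · have hq' : ¬ ((prev_tail.map PySem.Str.rstrip).drop ((prev_tail.map PySem.Str.rstrip).length - (k + 1))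
            = (curr_head.map PySem.Str.rstrip).take (k + 1)) := by
          intro h
          exact hq (by unfold pvQ; exact beq_iff_eq.mpr h)
        rw [if_neg hq']
        simp only [descRange, List.filter_cons, Bool.not_eq_true] at *
        rw [hq]
        simpa using ih

-- B's pvStep on Int candidates is the same step on the underlying Nat candidates
def pvStepN (H : List String) (l : List Nat) (x : String) : List Nat :=
  ((l ++ [0]).filter (fun c => decide (c < H.length) && (H.getD c "" == x))).map (fun c => c + 1)

theorem pvStep_cast (H : List String) (l : List Nat) (x : String) :
    pvStep H (l.map (fun c : Nat => (c : Int))) x = (pvStepN H l x).map (fun c : Nat => (c : Int)) := by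
  unfold pvStep pvStepN
  have h0 : (l.map (fun c : Nat => (c : Int)) ++ [(0 : Int)])
      = (l ++ [0]).map (fun c : Nat => (c : Int)) := by simp
  rw [h0, List.filter_map, List.map_map, List.map_map]
  have hpred : ((fun c : Int => decide (c < (H.length : Int)) && (PySem.List.pyGetD H c "" == x)) ∘
        (fun c : Nat => (c : Int)))
      = (fun c : Nat => decide (c < H.length) && (H.getD c "" == x)) := by
    funext c
    simp [Function.comp, Nat.cast_lt]
  have hfun : ((fun c : Int => c + 1) ∘ (fun c : Nat => (c : Int)))
      = ((fun c : Nat => (c : Int)) ∘ (fun c : Nat => c + 1)) := by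
    funext c; simp [Function.comp]
  rw [hpred, hfun]

theorem foldl_pvStep_cast (H : List String) : ∀ (T : List String) (l : List Nat),
    T.foldl (pvStep H) (l.map (fun c : Nat => (c : Int)))
      = (T.foldl (pvStepN H) l).map (fun c : Nat => (c : Int)) := by
  intro T
  induction T with
  | nil => intro l; simp
  | cons s rest ih => intro l; simp only [List.foldl_cons, pvStep_cast, ih]

-- pointwise correspondence of the predicates, for feasible c
theorem pvQ_point (T H : List String) (x : String) {c : Nat}
    (hc1 : c ≤ T.length) (hc2 : c ≤ H.length) :
    pvQ (T ++ [x]) H (c + 1) = (pvQ T H c && (decide (c < H.length) && (H.getD c "" == x))) := by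
  unfold pvQ
  have hdrop : (T ++ [x]).drop ((T ++ [x]).length - (c + 1)) = T.drop (T.length - c) ++ [x] := by
    have h1 : (T ++ [x]).length - (c + 1) = T.length - c := by simp
    rw [h1, List.drop_append_of_le_length (by omega)]
  rw [hdrop]
  by_cases hlt : c < H.length
  · have htake : H.take (c + 1) = H.take c ++ [H[c]] := by
      rw [List.take_add_one]
      simp [List.getElem?_eq_getElem hlt]
    rw [htake]
    have hlen : (T.drop (T.length - c)).length = (H.take c).length := by
      simp; omega
    rw [Bool.eq_iff_iff]
    simp only [beq_iff_eq, Bool.and_eq_true, decide_eq_true_eq]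
    constructor
    · intro he
      rcases List.append_inj he hlen with ⟨h1, h2⟩
      have hx : x = H[c] := by simpa using h2
      exact ⟨h1, hlt, by rw [List.getD_eq_getElem H "" hlt, hx]⟩
    · rintro ⟨h1, -, h2⟩
      rw [h1]
      rw [List.getD_eq_getElem H "" hlt] at h2
      simp [h2]
  · have htake : H.take (c + 1) = H := List.take_of_length_le (by omega)
    rw [htake]
    have hfalse : (T.drop (T.length - c) ++ [x] == H) = false := by
      apply beq_eq_false_iff_ne.mpr
      intro he
      have hl := congrArg List.length he
      simp at hl
      omega
    rw [hfalse]
    simp [hlt]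

-- one scan step transforms the set of live lengths exactly as appending a line to the tail does
theorem pvStepN_key (H T : List String) (x : String) :
    pvStepN H ((descRange (min T.length H.length)).filter (pvQ T H)) x
      = (descRange (min (T.length + 1) H.length)).filter (pvQ (T ++ [x]) H) := by
  unfold pvStepN
  have h0 : (descRange (min T.length H.length)).filter (pvQ T H) ++ [0]
      = (descRange (min T.length H.length) ++ [0]).filter (pvQ T H) := by
    rw [List.filter_append]
    simp [pvQ_zero]
  rw [h0, List.filter_filter]
  have hext : (descRange (min (T.length + 1) H.length)).filter (pvQ (T ++ [x]) H)
      = (descRange (min T.length H.length + 1)).filter (pvQ (T ++ [x]) H) := by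
    rcases Nat.lt_or_ge T.length H.length with h | h
    · have : min (T.length + 1) H.length = min T.length H.length + 1 := by omega
      rw [this]
    · have h1 : min (T.length + 1) H.length = H.length := by omega
      have h2 : min T.length H.length + 1 = H.length + 1 := by omega
      rw [h1, h2]
      have hstep : descRange (H.length + 1) = (H.length + 1) :: descRange H.length := rfl
      rw [hstep, List.filter_cons]
      have hf : pvQ (T ++ [x]) H (H.length + 1) = false := by
        unfold pvQ
        apply beq_eq_false_iff_ne.mpr
        intro he
        have hl := congrArg List.length he
        simp at hl
        omega
      simp [hf]
  rw [hext, ← map_succ_descRange, List.filter_map]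
  congr 1
  apply List.filter_congr
  intro c hc
  have hck : c ≤ min T.length H.length := by
    rcases (by simpa using hc : c ∈ descRange (min T.length H.length) ∨ c = 0) with h | h
    · exact (mem_descRange h).2
    · omega
  simp only [Function.comp]
  rw [pvQ_point T H x (by omega) (by omega), Bool.and_comm]

-- invariant of B's fold: the live list is exactly the descending list of matching sizes
theorem foldl_pvStepN (H : List String) (T : List String) :
    T.foldl (pvStepN H) [] = (descRange (min T.length H.length)).filter (pvQ T H) := by
  induction T using List.reverseRecOn with
  | nil => simp [descRange]
  | append_singleton T x ih =>
      rw [List.foldl_append, ih]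
      simp only [List.foldl_cons, List.foldl_nil]
      rw [pvStepN_key]
      simp

-- ===== VERDICT (by name: the statement is the Claim_ definition above) =====
theorem find_exact_boundary_match_py_spec : Claim_equal_find_exact_boundary_match_py := by
  intro prev_tail curr_head _
  unfold Spec_find_exact_boundary_match_py find_exact_boundary_match_py find_exact_boundary_match_py_alt
  have hmin : min ((prev_tail.length : Int)) ((curr_head.length : Int))
      = ((min prev_tail.length curr_head.length : Nat) : Int) := by
    exact_mod_cast (Nat.cast_min ..).symm
  have hfold : prev_tail.foldl
        (fun live line => pvStep (curr_head.map PySem.Str.rstrip) live (PySem.Str.rstrip line)) ([] : List Int)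
      = ((descRange (min prev_tail.length curr_head.length)).filter
          (pvQ (prev_tail.map PySem.Str.rstrip) (curr_head.map PySem.Str.rstrip))).map (fun c : Nat => (c : Int)) := by
    rw [← List.foldl_map]
    have h2 := foldl_pvStep_cast (curr_head.map PySem.Str.rstrip) (prev_tail.map PySem.Str.rstrip) []
    simp only [List.map_nil] at h2
    rw [h2, foldl_pvStepN]
    simp
  simp only [hmin]
  rw [pvALoop_eq, hfold]
  cases hL : (descRange (min prev_tail.length curr_head.length)).filter
      (pvQ (prev_tail.map PySem.Str.rstrip) (curr_head.map PySem.Str.rstrip)) with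
  | nil => simp
  | cons c r => simp
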